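-- pv_equiv track=rewrite | github.com/gillerick/Data-Structures-Algorithms | The Minion Game.py | kevin
-- ===== SOURCE A (Python) =====
-- def kevin(s):
--     score = 0
--     for c in s:
--         count = 0
--         if c == "a" or c == "e" or c == "i" or c == "o" or c == "u":
--             count += s.count(c, s.index(c), len(s))
--             score += count
--     return score
-- ===== SOURCE B (Python) =====
-- def kevin(s):
--     return sum(s.count(v) ** 2 for v in "aeiou")
-- ===== Notes on version B (the rewrite author's own statement) =====
-- stated objective: simpler
-- what changed: Iterate over the fixed 5-letter vowel alphabet and sum the square of each vowel's count, instead of A's per-character loop with a 5-way branch and an index/count-range scan per vowel occurrence.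
import Mathlib
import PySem

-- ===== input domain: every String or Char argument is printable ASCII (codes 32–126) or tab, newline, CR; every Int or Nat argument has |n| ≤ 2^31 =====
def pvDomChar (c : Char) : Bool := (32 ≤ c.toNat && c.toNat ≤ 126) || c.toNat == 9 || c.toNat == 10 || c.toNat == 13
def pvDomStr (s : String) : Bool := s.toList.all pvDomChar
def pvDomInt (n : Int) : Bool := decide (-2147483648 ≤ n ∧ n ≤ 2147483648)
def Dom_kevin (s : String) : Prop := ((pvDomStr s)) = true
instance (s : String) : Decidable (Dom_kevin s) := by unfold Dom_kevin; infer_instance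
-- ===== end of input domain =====

-- B replaces A's per-character loop (5-way vowel branch + index/count-range scan per
-- vowel occurrence) by a sum of squared counts over the fixed vowel alphabet (simpler).

-- ===== PORT A =====
-- s.index(c) always succeeds here (c is drawn from s), so the .getD 0 default never fires.
-- s.count(c, i, len(s)) for a 1-character needle c is exactly the count of c in the slice s[i:len(s)].
def kevin (s : String) : Int :=
  let L := s.toList
  L.foldl
    (fun score c =>
      if c = 'a' ∨ c = 'e' ∨ c = 'i' ∨ c = 'o' ∨ c = 'u' then
        let count : Int := 0
        let idx : Nat := (PySem.List.index? L c).getD 0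
        let count := count +
          ((PySem.List.slice L (some (idx : Int)) (some (L.length : Int))).count c : Int)
        score + count
      else score) 0

-- ===== PORT B =====
-- s.count(v) for a 1-character needle v is exactly List.count v on s.toList.
def kevin_alt (s : String) : Int :=
  (['a', 'e', 'i', 'o', 'u'].map (fun v => ((s.toList.count v : Int)) ^ 2)).sum

-- ===== PRECONDITION & SPEC =====
def Spec_kevin (s : String) (out : Int) : Prop := out = kevin_alt s
instance (s : String) (out : Int) : Decidable (Spec_kevin s out) := by unfold Spec_kevin; infer_instance

-- ===== CLAIM (what is proved, stated in full; the proofs are below) =====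
def Claim_equal_kevin : Prop := ∀ (s : String), Dom_kevin s → Spec_kevin s (kevin s)

-- ===== LEMMAS AND PROOFS =====

-- Dropping the prefix before the first occurrence of c removes no occurrence of c.
theorem count_drop_index {L : List Char} {c : Char} {k : Nat}
    (h : PySem.List.index? L c = some k) : (L.drop k).count c = L.count c := by
  obtain ⟨pre, suf, hL, hlen, hnot⟩ := (PySem.List.index?_eq_some_iff L c k).mp h
  subst hL
  rw [← hlen, List.drop_left' (by simp), List.count_append,
    List.count_eq_zero_of_not_mem hnot, Nat.zero_add]

-- A's per-element contribution, for c ∈ L, equals L.count c.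
theorem sliceCount_eq {L : List Char} {c : Char} (hc : c ∈ L) :
    (PySem.List.slice L (some (((List.idxOf? c L).getD 0 : Nat) : Int))
        (some (L.length : Int))).count c = L.count c := by
  rw [← PySem.List.index?_eq_idxOf?]
  obtain ⟨k, hk⟩ := Option.isSome_iff_exists.mp ((PySem.List.index?_isSome_iff L c).mpr hc)
  have hkle : k ≤ L.length := by
    obtain ⟨pre, suf, hL, hlen, -⟩ := (PySem.List.index?_eq_some_iff L c k).mp hk
    subst hL; simp [← hlen]
  rw [hk, Option.getD_some, PySem.List.slice_natCast,
    List.take_of_length_le (by simp), count_drop_index hk]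

-- indicator sum: Σ_{c∈L} (if c = v then k else 0) = count v * k
theorem sum_map_ite_eq {L : List Char} (v : Char) (k : Int) :
    (L.map (fun c => if c = v then k else 0)).sum = (L.count v : Int) * k := by
  induction L with
  | nil => simp
  | cons x xs ih =>
    by_cases hx : x = v
    · simp [hx, ih]; ring
    · simp [hx, ih]

theorem kevin_eq_alt (s : String) : kevin s = kevin_alt s := by
  unfold kevin kevin_alt
  set L := s.toList with hLdef
  rw [PySem.List.foldl_congr_mem L _
      (fun score c =>
        score + ((if c = 'a' then (L.count 'a' : Int) else 0)
          + ((if c = 'e' then (L.count 'e' : Int) else 0)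
          + ((if c = 'i' then (L.count 'i' : Int) else 0)
          + ((if c = 'o' then (L.count 'o' : Int) else 0)
          + (if c = 'u' then (L.count 'u' : Int) else 0)))))) 0
      (by
        intro acc c hc
        by_cases ha : c = 'a'
        · subst ha; simp [sliceCount_eq hc]
        by_cases he : c = 'e'
        · subst he; simp [sliceCount_eq hc, ha]
        by_cases hi : c = 'i'
        · subst hi; simp [sliceCount_eq hc, ha, he]
        by_cases ho : c = 'o'
        · subst ho; simp [sliceCount_eq hc, ha, he, hi]
        by_cases hu : c = 'u'
        · subst hu; simp [sliceCount_eq hc, ha, he, hi, ho]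
        · simp [ha, he, hi, ho, hu]),
    PySem.List.foldl_add, PySem.List.sum_map_add_int, PySem.List.sum_map_add_int,
    PySem.List.sum_map_add_int, PySem.List.sum_map_add_int,
    sum_map_ite_eq, sum_map_ite_eq, sum_map_ite_eq, sum_map_ite_eq, sum_map_ite_eq]
  simp [List.map, pow_two]

-- ===== VERDICT (by name: the statement is the Claim_ definition above) =====
theorem kevin_spec : Claim_equal_kevin := by
  intro s _
  unfold Spec_kevin
  exact kevin_eq_alt s
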